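-- pv_equiv track=rewrite | github.com/BaioSbubens/BigDataComputing | HW1/G050.py | points_count_per_cell
-- ===== SOURCE A (Python) =====
-- def points_count_per_cell(cell):
--     pairs_dict = {}
--     for p in cell:
--         if p not in pairs_dict.keys():
--             pairs_dict[p] = 1
--         else:
--             pairs_dict[p] += 1
--     return [(key, pairs_dict[key]) for key in pairs_dict.keys()]
-- ===== SOURCE B (Python) =====
-- def points_count_per_cell(cell):
--     data = list(cell)
--     result = []
--     while data:
--         p = data[0]
--         rest = [q for q in data if q != p]
--         result.append((p, len(data) - len(rest)))
--         data = rest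
--     return result
-- ===== Notes on version B (the rewrite author's own statement) =====
-- stated objective: alternative
-- what changed: Replaces the single-pass dict counter with a peeling recursion: take the first element, remove all its occurrences from the list (the drop in length is its count), emit the pair, and repeat on the shrunken remainder.
import Mathlib
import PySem

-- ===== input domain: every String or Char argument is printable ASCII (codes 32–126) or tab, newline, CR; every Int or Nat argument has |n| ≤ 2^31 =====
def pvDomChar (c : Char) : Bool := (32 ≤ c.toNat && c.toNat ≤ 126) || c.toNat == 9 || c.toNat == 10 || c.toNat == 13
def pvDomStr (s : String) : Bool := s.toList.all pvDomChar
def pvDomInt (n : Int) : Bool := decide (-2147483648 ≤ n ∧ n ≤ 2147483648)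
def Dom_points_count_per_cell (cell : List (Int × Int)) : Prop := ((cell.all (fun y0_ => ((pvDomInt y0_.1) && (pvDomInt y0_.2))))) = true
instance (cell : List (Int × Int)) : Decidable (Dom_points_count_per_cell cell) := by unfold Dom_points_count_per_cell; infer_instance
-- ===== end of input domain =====

-- B replaces A's single-pass dict counter with a peeling recursion: take the first element,
-- remove all its occurrences (the drop in length is its count), recurse on the remainder
-- (objective: alternative; return values identical).

-- ===== PORT A =====
def points_count_per_cell (cell : List (Int × Int)) : List ((Int × Int) × Int) :=
  let pairs_dict : PySem.Dict (Int × Int) Int :=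
    cell.foldl (fun d p =>
      if d.contains p = false then d.insert p 1
      else d.insert p (d.getD p 0 + 1)) PySem.Dict.empty
  pairs_dict.keys.map (fun key => (key, pairs_dict.getD key 0))

-- ===== PORT B =====
-- the while-loop of Source B as a recursion on the shrinking list
def pvPeel : List (Int × Int) → List ((Int × Int) × Int)
  | [] => []
  | p :: t =>
    let rest := (p :: t).filter (fun q => decide (q ≠ p))
    ((p, ((p :: t).length : Int) - (rest.length : Int)) :: pvPeel rest)
termination_by data => data.length
decreasing_by
  simp only [List.filter]
  simp only [decide_not, ne_eq, not_true_eq_false, decide_false]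
  have := List.length_filter_le (fun q => !decide (q = p)) t
  simpa using Nat.lt_succ_of_le this

def points_count_per_cell_alt (cell : List (Int × Int)) : List ((Int × Int) × Int) :=
  pvPeel cell

-- ===== PRECONDITION & SPEC =====
def Spec_points_count_per_cell (cell : List (Int × Int)) (out : List ((Int × Int) × Int)) : Prop := out = points_count_per_cell_alt cell
instance (cell : List (Int × Int)) (out : List ((Int × Int) × Int)) : Decidable (Spec_points_count_per_cell cell out) := by unfold Spec_points_count_per_cell; infer_instance

-- ===== CLAIM (what is proved, stated in full; the proofs are below) =====
def Claim_equal_points_count_per_cell : Prop := ∀ (cell : List (Int × Int)), Dom_points_count_per_cell cell → Spec_points_count_per_cell cell (points_count_per_cell cell)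

-- ===== LEMMAS AND PROOFS =====

-- A's loop body equals the canonical counter step on every state, so the fold is Counter(cell).
theorem pv_fold_eq_counter (cell : List (Int × Int)) :
    cell.foldl (fun (d : PySem.Dict (Int × Int) Int) p =>
      if d.contains p = false then d.insert p 1
      else d.insert p (d.getD p 0 + 1)) PySem.Dict.empty
    = PySem.Dict.counter cell := by
  rw [← PySem.Dict.foldl_insert_getD_add_one_eq_counter]
  apply PySem.List.foldl_congr_mem
  intro d p _
  by_cases h : d.contains p = true
  · simp [h]
  · have h0 : d.getD p 0 = 0 := PySem.Dict.getD_of_not_contains (d := d) (k := p) 0 (by simpa using h)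
    simp [h, h0]

-- dedup of a filtered list: folding Set.add ignores elements already in the accumulator
theorem pv_foldl_add_filter (xs : List (Int × Int)) (a : Int × Int) :
    ∀ acc : PySem.Set (Int × Int), a ∈ acc →
      xs.foldl PySem.Set.add acc = (xs.filter (fun q => decide (q ≠ a))).foldl PySem.Set.add acc := by
  induction xs with
  | nil => intro acc _; rfl
  | cons y ys ih =>
    intro acc ha
    by_cases hy : y = a
    · subst hy
      have hadd : PySem.Set.add acc y = acc := by
        simp [PySem.Set.add, PySem.Set.contains, ha]
      simp [List.filter, List.foldl, hadd, ih acc ha]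
    · have hfy : (y :: ys).filter (fun q => decide (q ≠ a)) = y :: ys.filter (fun q => decide (q ≠ a)) := by
        simp [List.filter, hy]
      rw [hfy]
      simp only [List.foldl]
      refine ih _ ?_
      unfold PySem.Set.add
      split
      · exact ha
      · simp [ha]

-- a head the tail never repeats passes through the fold
theorem pv_foldl_add_cons (xs : List (Int × Int)) (a : Int × Int) :
    ∀ acc : PySem.Set (Int × Int), (∀ y ∈ xs, y ≠ a) →
      xs.foldl PySem.Set.add (a :: acc) = a :: xs.foldl PySem.Set.add acc := by
  induction xs with
  | nil => intro acc _; rfl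
  | cons y ys ih =>
    intro acc hne
    have hy : y ≠ a := hne y (by simp)
    have hstep : PySem.Set.add (a :: acc) y = a :: PySem.Set.add acc y := by
      unfold PySem.Set.add PySem.Set.contains
      have hc : (a :: acc).contains y = acc.contains y := by
        simp [hy]
      rw [hc]
      split <;> simp_all
    simp only [List.foldl, hstep]
    exact ih _ (fun z hz => hne z (by simp [hz]))

-- set(p :: t) is p followed by set(t with all p removed)
theorem pv_ofList_cons (p : Int × Int) (t : List (Int × Int)) :
    PySem.Set.ofList (p :: t) = p :: PySem.Set.ofList (t.filter (fun q => decide (q ≠ p))) := by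
  have h1 : PySem.Set.ofList (p :: t) = t.foldl PySem.Set.add [p] := by
    rw [PySem.Set.ofList_eq_foldl]; rfl
  rw [h1, pv_foldl_add_filter t p [p] (by simp)]
  have h2 := pv_foldl_add_cons (t.filter (fun q => decide (q ≠ p))) p []
    (by intro y hy; simp at hy; exact hy.2)
  rw [h2, PySem.Set.ofList_eq_foldl]

-- counts survive filtering out a different key
theorem pv_count_filter (t : List (Int × Int)) (p k : Int × Int) (hk : k ≠ p) :
    (t.filter (fun q => decide (q ≠ p))).count k = t.count k := by
  rw [List.count_filter]
  simp [hk]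

-- the removed length is the head's count
theorem pv_length_filter (t : List (Int × Int)) (p : Int × Int) :
    ((p :: t).length : Int) - (((p :: t).filter (fun q => decide (q ≠ p))).length : Int)
      = ((p :: t).count p : Int) := by
  have h1 : ((p :: t).filter (fun q => decide (q ≠ p))).length
      = (p :: t).countP (fun q => decide (q ≠ p)) := List.countP_eq_length_filter.symm
  have h2 := List.length_eq_countP_add_countP (fun q => decide (q ≠ p)) (l := p :: t)
  have h3 : (p :: t).countP (fun q => decide (¬(decide (q ≠ p)) = true)) = (p :: t).count p := by
    unfold List.count
    apply List.countP_congr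
    intro x _
    by_cases hxp : x = p <;> simp [hxp]
  rw [h1]
  omega

-- pvPeel computes (set(xs)).map (k, count k)
theorem pv_peel_eq (n : ℕ) : ∀ xs : List (Int × Int), xs.length ≤ n →
    pvPeel xs = (PySem.Set.ofList xs).map (fun k => (k, (xs.count k : Int))) := by
  induction n with
  | zero =>
    intro xs h
    have hnil : xs = [] := List.eq_nil_of_length_eq_zero (Nat.le_zero.mp h)
    subst hnil
    simp [pvPeel, PySem.Set.ofList]
  | succ n ih =>
    intro xs h
    match xs with
    | [] => simp [pvPeel, PySem.Set.ofList]
    | p :: t =>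
      rw [pvPeel]
      have hlen : ((p :: t).filter (fun q => decide (q ≠ p))).length ≤ n := by
        have h1 : ((p :: t).filter (fun q => decide (q ≠ p))).length = (t.filter (fun q => decide (q ≠ p))).length := by
          simp [List.filter]
        have h2 := List.length_filter_le (fun q => decide (q ≠ p)) t
        simp at h
        omega
      rw [ih _ hlen, pv_ofList_cons, List.map_cons]
      have hf : (p :: t).filter (fun q => decide (q ≠ p)) = t.filter (fun q => decide (q ≠ p)) := by
        simp [List.filter]
      congr 1
      · rw [pv_length_filter]
      · rw [hf]
        apply List.map_congr_left
        intro k hk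
        have hkmem : k ∈ t.filter (fun q => decide (q ≠ p)) :=
          (PySem.Set.mem_ofList (t.filter (fun q => decide (q ≠ p))) k).mp hk
        have hkp : k ≠ p := by
          have := List.of_mem_filter hkmem
          simpa using this
        rw [pv_count_filter t p k hkp]
        simp [List.count_cons]
        exact fun h => hkp h.symm

-- ===== VERDICT (by name: the statement is the Claim_ definition above) =====
theorem points_count_per_cell_spec : Claim_equal_points_count_per_cell := by
  intro cell _
  unfold Spec_points_count_per_cell points_count_per_cell points_count_per_cell_alt
  rw [pv_peel_eq cell.length cell le_rfl]
  simp only [pv_fold_eq_counter, PySem.Dict.keys_counter, PySem.Dict.getD_counter]
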